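-- pv_equiv track=rewrite | github.com/Abdelrahman-ibrahem-elfiky/Disk_Scheduling-GUI | main.py | CLOOK_Inword
-- ===== SOURCE A (Python) =====
-- def CLOOK_Inword(Request, Start):
--     n = len(Request)
--     Order = []
--
--     k = Start+1
--     Order.append(Start)
--     while k < 200:
--         for l in range(0,n):
--             if(Request[l] == k):
--                 Order.append(k)
--         k += 1
--
--
--     i = 0
--     while i < Start:
--         for j in range(0,n):
--             if(Request[j] == i):
--                 Order.append(i)
--         i += 1
--
--
--     Sum = 0
--     for p in range(0,len(Order) - 1):
--          Sum += abs(Order[p] - Order[p+1])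
--     return Order, Sum
-- ===== SOURCE B (Python) =====
-- def CLOOK_Inword(Request, Start):
--     up = sorted(x for x in Request if Start < x < 200)
--     low = sorted(x for x in Request if 0 <= x < Start)
--     order = [Start] + up + low
--     total = sum(abs(a - b) for a, b in zip(order, order[1:]))
--     return order, total
-- ===== Notes on version B (the rewrite author's own statement) =====
-- stated objective: faster
-- what changed: Replaces A's scan of the whole request list once per cylinder value (200 passes) by two filters and sorts of the request list, and the index-based seek sum by a zip over adjacent pairs.
import Mathlib
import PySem

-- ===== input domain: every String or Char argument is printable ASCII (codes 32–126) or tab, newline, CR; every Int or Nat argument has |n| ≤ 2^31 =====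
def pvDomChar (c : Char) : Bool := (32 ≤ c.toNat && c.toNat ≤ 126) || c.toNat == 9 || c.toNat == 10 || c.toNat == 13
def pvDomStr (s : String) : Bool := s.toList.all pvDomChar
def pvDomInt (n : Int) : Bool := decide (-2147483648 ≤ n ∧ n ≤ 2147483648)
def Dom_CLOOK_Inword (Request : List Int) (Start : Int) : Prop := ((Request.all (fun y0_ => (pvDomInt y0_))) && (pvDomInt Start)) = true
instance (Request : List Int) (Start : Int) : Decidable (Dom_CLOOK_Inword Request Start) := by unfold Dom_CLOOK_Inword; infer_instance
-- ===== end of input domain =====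

-- B replaces A's per-cylinder passes over the request list by filter+sort, and the
-- index-based seek-distance sum by a zip over adjacent pairs (objective: faster).

-- ===== PORT A =====
def CLOOK_Inword (Request : List Int) (Start : Int) : List Int × Int :=
  let n : Int := (Request.length : Int)
  let Order : List Int := [Start]
  -- while k < 200: for l in range(0, n): if Request[l] == k: Order.append(k); k += 1
  let Order := (PySem.List.pyRange (Start + 1) 200 1).foldl (fun ord k =>
      (PySem.List.pyRange 0 n 1).foldl (fun ord2 l =>
        if PySem.List.pyGetD Request l 0 = k then ord2 ++ [k] else ord2) ord) Order
  -- while i < Start: for j in range(0, n): if Request[j] == i: Order.append(i); i += 1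
  let Order := (PySem.List.pyRange 0 Start 1).foldl (fun ord i =>
      (PySem.List.pyRange 0 n 1).foldl (fun ord2 j =>
        if PySem.List.pyGetD Request j 0 = i then ord2 ++ [i] else ord2) ord) Order
  -- Sum of |Order[p] - Order[p+1]| over p in range(0, len(Order)-1)
  let Sum : Int := (PySem.List.pyRange 0 ((Order.length : Int) - 1) 1).foldl (fun s p =>
      s + |PySem.List.pyGetD Order p 0 - PySem.List.pyGetD Order (p + 1) 0|) 0
  (Order, Sum)

-- ===== PORT B =====
def CLOOK_Inword_alt (Request : List Int) (Start : Int) : List Int × Int :=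
  let up := PySem.List.sorted (Request.filter (fun x => decide (Start < x ∧ x < 200))) (fun x => x) false
  let low := PySem.List.sorted (Request.filter (fun x => decide (0 ≤ x ∧ x < Start))) (fun x => x) false
  let order := Start :: (up ++ low)
  let total := ((order.zip order.tail).map (fun q => |q.1 - q.2|)).sum
  (order, total)

-- ===== PRECONDITION & SPEC =====
def Spec_CLOOK_Inword (Request : List Int) (Start : Int) (out : List Int × Int) : Prop := out = CLOOK_Inword_alt Request Start
instance (Request : List Int) (Start : Int) (out : List Int × Int) : Decidable (Spec_CLOOK_Inword Request Start out) := by unfold Spec_CLOOK_Inword; infer_instance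

-- ===== CLAIM (what is proved, stated in full; the proofs are below) =====
def Claim_equal_CLOOK_Inword : Prop := ∀ (Request : List Int) (Start : Int), Dom_CLOOK_Inword Request Start → Spec_CLOOK_Inword Request Start (CLOOK_Inword Request Start)

-- ===== LEMMAS AND PROOFS =====

-- A's inner index loop over Request, appending k on each hit, is the filter of Request at k
theorem inner_loop_eq_filter (Request : List Int) (k : Int) (ord : List Int) :
    (PySem.List.pyRange 0 (Request.length : Int) 1).foldl (fun ord2 l =>
        if PySem.List.pyGetD Request l 0 = k then ord2 ++ [k] else ord2) ord
      = ord ++ Request.filter (fun x => x = k) := by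
  have h := PySem.List.foldl_pyRange_zero_pyGetD Request 0
      (fun ord2 x => if x = k then ord2 ++ [k] else ord2) ord
  simp only [PySem.List.len] at h
  rw [h]
  have h2 := PySem.List.foldl_append_if (fun x => decide (x = k)) (fun _ => k) Request ord
  simp only [decide_eq_true_eq] at h2
  rw [h2]
  congr 1
  have : Request.filter (fun x => decide (x = k)) = List.replicate (Request.count k) k := by
    simpa using List.filter_beq (l := Request) k
  rw [this, List.map_replicate]

theorem count_filter_eq (req : List Int) (k v : Int) :
    (req.filter (fun x => x = k)).count v = if v = k then req.count v else 0 := by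
  by_cases h : v = k
  · subst h; rw [List.count_filter (by simp)]; simp
  · rw [if_neg h, List.count_eq_zero]
    intro hm
    exact h (by simpa using List.of_mem_filter hm)

-- the flatMap of per-value filters over a nodup value list is a permutation of one filter by membership
theorem flatMap_filter_perm (ks : List Int) (hk : ks.Nodup) (req : List Int) :
    (ks.flatMap (fun k => req.filter (fun x => x = k))).Perm
      (req.filter (fun x => decide (x ∈ ks))) := by
  rw [List.perm_iff_count]
  intro v
  induction ks with
  | nil => simp
  | cons k ks ih =>
    have hknotin : k ∉ ks := (List.nodup_cons.mp hk).1
    have ih' := ih (List.nodup_cons.mp hk).2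
    rw [List.flatMap_cons, List.count_append, ih', count_filter_eq]
    have h1 : (req.filter (fun x => decide (x ∈ k :: ks))).count v
        = if v ∈ k :: ks then req.count v else 0 := by
      by_cases h : v ∈ k :: ks
      · rw [if_pos h, List.count_filter (by simpa using h)]
      · rw [if_neg h, List.count_eq_zero]
        intro hm; exact h (by simpa using List.of_mem_filter hm)
    have h2 : (req.filter (fun x => decide (x ∈ ks))).count v
        = if v ∈ ks then req.count v else 0 := by
      by_cases h : v ∈ ks
      · rw [if_pos h, List.count_filter (by simpa using h)]
      · rw [if_neg h, List.count_eq_zero]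
        intro hm; exact h (by simpa using List.of_mem_filter hm)
    rw [h1, h2]
    by_cases hv : v = k
    · subst hv; simp [hknotin]
    · simp [hv]

-- the flatMap of per-value filters over a strictly increasing value list is nondecreasing
theorem flatMap_filter_pairwise (ks : List Int) (hk : ks.Pairwise (· < ·)) (req : List Int) :
    (ks.flatMap (fun k => req.filter (fun x => x = k))).Pairwise (· ≤ ·) := by
  induction ks with
  | nil => simp
  | cons k ks ih =>
    rw [List.flatMap_cons, List.pairwise_append]
    refine ⟨?_, ih (List.pairwise_cons.mp hk).2, ?_⟩
    · have : req.filter (fun x => decide (x = k)) = List.replicate (req.count k) k := by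
        simpa using List.filter_beq (l := req) k
      rw [this, List.pairwise_replicate]
      right; exact le_refl k
    · intro a ha b hb
      have hak : a = k := by simpa using List.of_mem_filter ha
      obtain ⟨k', hk', hbk⟩ := List.mem_flatMap.mp hb
      have hbk' : b = k' := by simpa using List.of_mem_filter hbk
      have : k < k' := (List.pairwise_cons.mp hk).1 k' hk'
      omega

-- emitting each cylinder value of [a, b) in turn, with all its occurrences, is sorting the in-range requests
theorem flatMap_eq_sorted_filter (a b : Int) (req : List Int) :
    (PySem.List.pyRange a b 1).flatMap (fun k => req.filter (fun x => x = k))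
      = PySem.List.sorted (req.filter (fun x => decide (a ≤ x ∧ x < b))) (fun x => x) false := by
  have hperm := flatMap_filter_perm (PySem.List.pyRange a b 1) (PySem.List.nodup_pyRange_one a b) req
  have hpw := flatMap_filter_pairwise (PySem.List.pyRange a b 1) (PySem.List.pairwise_lt_pyRange_one a b) req
  have hfe : req.filter (fun x => decide (x ∈ PySem.List.pyRange a b 1))
      = req.filter (fun x => decide (a ≤ x ∧ x < b)) := by
    apply List.filter_congr; intro x _; simp [PySem.List.mem_pyRange_one]
  rw [hfe] at hperm
  exact (PySem.List.sorted_id_eq_of_perm_of_pairwise _ _ hperm hpw).symm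

-- the index-based adjacent-difference sum equals the zip-based one, on any list
theorem sum_adjacent_eq (o : List Int) :
    (PySem.List.pyRange 0 ((o.length : Int) - 1) 1).foldl (fun s p =>
        s + |PySem.List.pyGetD o p 0 - PySem.List.pyGetD o (p + 1) 0|) 0
      = ((o.zip o.tail).map (fun q => |q.1 - q.2|)).sum := by
  rw [PySem.List.foldl_add, zero_add]
  congr 1
  apply List.ext_getElem
  · simp [PySem.List.length_pyRange_one, List.length_zip]
  · intro i h1 h2
    have hlen : i < o.length - 1 := by
      simpa [PySem.List.length_pyRange_one] using h1
    simp only [List.getElem_map, PySem.List.getElem_pyRange_one, List.getElem_zip, List.getElem_tail]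
    rw [zero_add]
    rw [PySem.List.pyGetD_eq_getElem o 0 (by positivity) (by exact_mod_cast (by omega : i < o.length))]
    rw [show ((i : Int) + 1) = ((i + 1 : Nat) : Int) by push_cast; ring]
    rw [PySem.List.pyGetD_eq_getElem o 0 (by positivity) (by exact_mod_cast (by omega : i + 1 < o.length))]
    simp

-- A's Order list equals B's order list
theorem order_eq (Request : List Int) (Start : Int) :
    ((PySem.List.pyRange 0 Start 1).foldl (fun ord i =>
        (PySem.List.pyRange 0 (Request.length : Int) 1).foldl (fun ord2 j =>
          if PySem.List.pyGetD Request j 0 = i then ord2 ++ [i] else ord2) ord)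
      ((PySem.List.pyRange (Start + 1) 200 1).foldl (fun ord k =>
        (PySem.List.pyRange 0 (Request.length : Int) 1).foldl (fun ord2 l =>
          if PySem.List.pyGetD Request l 0 = k then ord2 ++ [k] else ord2) ord) [Start]))
    = Start :: (PySem.List.sorted (Request.filter (fun x => decide (Start < x ∧ x < 200))) (fun x => x) false
        ++ PySem.List.sorted (Request.filter (fun x => decide (0 ≤ x ∧ x < Start))) (fun x => x) false) := by
  have hinner : ∀ (lo hi : Int) (init : List Int),
      (PySem.List.pyRange lo hi 1).foldl (fun ord k =>
        (PySem.List.pyRange 0 (Request.length : Int) 1).foldl (fun ord2 l =>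
          if PySem.List.pyGetD Request l 0 = k then ord2 ++ [k] else ord2) ord) init
      = init ++ (PySem.List.pyRange lo hi 1).flatMap (fun k => Request.filter (fun x => x = k)) := by
    intro lo hi init
    rw [PySem.List.foldl_congr_mem _ _ (fun ord k => ord ++ Request.filter (fun x => x = k)) init
      (fun acc k _ => inner_loop_eq_filter Request k acc)]
    exact PySem.List.foldl_append_eq_flatMap _ _ init
  rw [hinner, hinner]
  rw [flatMap_eq_sorted_filter, flatMap_eq_sorted_filter]
  have hup : Request.filter (fun x => decide (Start + 1 ≤ x ∧ x < 200))
      = Request.filter (fun x => decide (Start < x ∧ x < 200)) := by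
    apply List.filter_congr; intro x _
    simp only [decide_eq_decide]; omega
  rw [hup]
  simp

-- ===== VERDICT (by name: the statement is the Claim_ definition above) =====
theorem CLOOK_Inword_spec : Claim_equal_CLOOK_Inword := by
  intro Request Start _
  show CLOOK_Inword Request Start = CLOOK_Inword_alt Request Start
  unfold CLOOK_Inword CLOOK_Inword_alt
  simp only []
  rw [order_eq Request Start]
  rw [sum_adjacent_eq]
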